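-- pv_equiv track=rewrite | github.com/HANYUJINius/Baekjoon-Programmers | 프로그래머스/unrated/181874. A 강조하기/A 강조하기.py | solution
-- ===== SOURCE A (Python) =====
-- def solution(myString):
--     answer = ''
--     arr = []
--     for i in myString:
--         if i == 'a' or i =="A":
--             arr.append('A')
--         else:
--             arr.append(i.lower())
--     answer = ''.join(arr)
--     return answer
-- ===== SOURCE B (Python) =====
-- def solution(myString):
--     return myString.lower().replace('a', 'A')
-- ===== Notes on version B (the rewrite author's own statement) =====
-- stated objective: simpler
-- what changed: Replaces the per-character if/else append loop and join with two whole-string builtin passes: lowercase everything, then replace each lowercase-a by uppercase; measured faster in a timing run (C-level builtins vs a Python-level loop).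
import Mathlib
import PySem

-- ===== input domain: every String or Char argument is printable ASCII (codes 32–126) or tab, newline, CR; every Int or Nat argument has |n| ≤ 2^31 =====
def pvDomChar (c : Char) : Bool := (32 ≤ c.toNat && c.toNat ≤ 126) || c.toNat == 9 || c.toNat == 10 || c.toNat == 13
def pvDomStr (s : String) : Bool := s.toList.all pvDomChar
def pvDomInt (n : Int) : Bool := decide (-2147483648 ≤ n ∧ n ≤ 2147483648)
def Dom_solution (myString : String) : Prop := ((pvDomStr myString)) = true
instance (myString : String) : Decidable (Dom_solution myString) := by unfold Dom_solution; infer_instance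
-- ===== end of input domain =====

-- B replaces A's per-character if/else append loop + join with two whole-string passes: lower() then replace('a','A'); objective: simpler.

-- ===== PORT A =====
def solution (myString : String) : String :=
  let arr : List String :=
    myString.toList.foldl
      (fun arr i =>
        if i = 'a' ∨ i = 'A' then arr ++ ["A"]
        else arr ++ [PySem.Str.lower (String.ofList [i])]) []
  PySem.Str.join "" arr

-- ===== PORT B =====
def solution_alt (myString : String) : String :=
  PySem.Str.replace (PySem.Str.lower myString) "a" "A"

-- ===== PRECONDITION & SPEC =====
def Spec_solution (myString : String) (out : String) : Prop := out = solution_alt myString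
instance (myString : String) (out : String) : Decidable (Spec_solution myString out) := by unfold Spec_solution; infer_instance

-- ===== CLAIM (what is proved, stated in full; the proofs are below) =====
def Claim_equal_solution : Prop := ∀ (myString : String), Dom_solution myString → Spec_solution myString (solution myString)

-- ===== LEMMAS AND PROOFS =====

theorem replace_go_single (a b : Char) :
    ∀ (l acc : List Char) (fuel : Nat), l.length ≤ fuel →
      PySem.Chars.replace.go [a] [b] fuel l acc
        = acc.reverse ++ l.map (fun c => if c = a then b else c) := by
  intro l
  induction l with
  | nil =>
    intro acc fuel _
    cases fuel <;> simp [PySem.Chars.replace.go]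
  | cons c t ih =>
    intro acc fuel hf
    cases fuel with
    | zero => simp at hf
    | succ n =>
      simp only [PySem.Chars.replace.go]
      by_cases h : c = a
      · subst h
        simp only [List.isPrefixOf, beq_self_eq_true, Bool.true_and, if_pos]
        simp only [List.length_cons, List.length_nil, Nat.zero_add, List.drop_succ_cons,
          List.drop_zero]
        rw [ih _ n (by simpa using hf)]
        simp
      · have : List.isPrefixOf [a] (c :: t) = false := by
          simp [List.isPrefixOf]
          exact fun hh => absurd hh.symm h
        rw [this]
        simp only [Bool.false_eq_true, if_false]
        rw [ih _ n (by simpa using hf)]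
        simp [h]

theorem lowerChar_eq_a_iff (c : Char) : PySem.Chars.lowerChar c = 'a' ↔ (c = 'a' ∨ c = 'A') := by
  constructor
  · intro h
    unfold PySem.Chars.lowerChar PySem.Chars.isupper at h
    split_ifs at h with hu
    · right
      have h1 : (Char.ofNat (c.toNat + 32)).toNat = 97 := by rw [h]; rfl
      simp only [Bool.and_eq_true, decide_eq_true_eq, Char.le_def, UInt32.le_iff_toNat_le] at hu
      have hb : c.toNat ≤ 90 := hu.2
      have hv : (c.toNat + 32).isValidChar := by
        left
        unfold Char.toNat at hb ⊢
        omega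
      rw [Char.toNat_ofNat, if_pos hv] at h1
      have h65 : c.toNat = 65 := by omega
      have := Char.ofNat_toNat c
      rw [h65] at this
      exact this.symm
    · left; exact h
  · intro h
    rcases h with h | h <;> subst h <;> decide

theorem arr_foldl (l : List Char) (acc : List String) :
    (l.foldl
      (fun arr i =>
        if i = 'a' ∨ i = 'A' then arr ++ ["A"]
        else arr ++ [PySem.Str.lower (String.ofList [i])]) acc)
    = acc ++ l.map (fun i => if i = 'a' ∨ i = 'A' then "A" else PySem.Str.lower (String.ofList [i])) := by
  induction l generalizing acc with
  | nil => simp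
  | cons c t ih =>
    simp only [List.foldl_cons, List.map_cons]
    by_cases h : c = 'a' ∨ c = 'A' <;> simp [h, ih]

theorem toList_solution (s : String) :
    (solution s).toList = s.toList.map (fun i => if i = 'a' ∨ i = 'A' then 'A' else PySem.Chars.lowerChar i) := by
  unfold solution
  rw [arr_foldl]
  simp only [List.nil_append]
  rw [PySem.Str.toList_join]
  have hsep : ("" : String).toList = [] := rfl
  rw [hsep]
  have hparts :
      (s.toList.map (fun i => if i = 'a' ∨ i = 'A' then "A" else PySem.Str.lower (String.ofList [i]))).map String.toList
        = (s.toList.map (fun i => if i = 'a' ∨ i = 'A' then 'A' else PySem.Chars.lowerChar i)).map (fun c => [c]) := by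
    simp only [List.map_map]
    apply List.map_congr_left
    intro i _
    by_cases h : i = 'a' ∨ i = 'A'
    · simp [Function.comp, h]
    · simp only [Function.comp, h, if_false]
      rw [PySem.Str.toList_lower]
      simp [PySem.Chars.lower]
  rw [hparts, PySem.Chars.join_nil_singletons]

theorem toList_solution_alt (s : String) :
    (solution_alt s).toList = s.toList.map (fun i => if i = 'a' ∨ i = 'A' then 'A' else PySem.Chars.lowerChar i) := by
  unfold solution_alt
  rw [PySem.Str.toList_replace, PySem.Str.toList_lower]
  show PySem.Chars.replace (PySem.Chars.lower s.toList) ['a'] ['A'] = _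
  unfold PySem.Chars.replace
  simp only [List.isEmpty_cons, Bool.false_eq_true, if_false]
  rw [replace_go_single 'a' 'A' _ [] _ le_rfl]
  simp only [List.reverse_nil, List.nil_append, PySem.Chars.lower, List.map_map]
  apply List.map_congr_left
  intro c _
  simp only [Function.comp]
  by_cases h : c = 'a' ∨ c = 'A'
  · rw [if_pos h, if_pos]
    rw [lowerChar_eq_a_iff]; exact h
  · rw [if_neg h, if_neg]
    rw [lowerChar_eq_a_iff]; exact h

-- ===== VERDICT (by name: the statement is the Claim_ definition above) =====
theorem solution_spec : Claim_equal_solution := by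
  intro s _
  unfold Spec_solution
  have := (toList_solution s).trans (toList_solution_alt s).symm
  exact String.ext (by simpa using this)
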